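-- pv_equiv track=rewrite | github.com/ingStudiosOfficial/Lunite | lunite.py | _advance_loc
-- ===== SOURCE A (Python) =====
-- def _advance_loc(line, col, text):
--     for char in text:
--         if char == '\n':
--             line += 1
--             col = 1
--         else:
--             col += 1
--     return line, col
-- ===== SOURCE B (Python) =====
-- def _advance_loc(line, col, text):
--     n = text.count('\n')
--     if n == 0:
--         return line, col + len(text)
--     # column = 1 + number of characters after the last newline
--     return line + n, 1 + text[::-1].find('\n')
-- ===== Notes on version B (the rewrite author's own statement) =====
-- stated objective: faster
-- what changed: replaces the per-character loop and branch with aggregate string methods: line advances by the newline count, and the column is read off from the position of the last newline (or the text length when there is none)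
import Mathlib
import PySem

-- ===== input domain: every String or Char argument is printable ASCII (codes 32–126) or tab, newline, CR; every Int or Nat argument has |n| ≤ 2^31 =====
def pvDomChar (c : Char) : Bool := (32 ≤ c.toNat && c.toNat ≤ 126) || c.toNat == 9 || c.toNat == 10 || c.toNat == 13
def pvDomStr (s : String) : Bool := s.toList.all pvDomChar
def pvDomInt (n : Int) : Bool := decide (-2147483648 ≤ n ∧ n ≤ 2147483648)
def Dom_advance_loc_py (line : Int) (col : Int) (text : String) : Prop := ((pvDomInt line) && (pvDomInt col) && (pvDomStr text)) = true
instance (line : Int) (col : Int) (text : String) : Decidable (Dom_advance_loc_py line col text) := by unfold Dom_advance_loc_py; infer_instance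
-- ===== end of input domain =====

-- ===== PORT A =====
-- B replaces the per-character loop with aggregate computations: newline count + position of last newline.
def advance_loc_py (line : Int) (col : Int) (text : String) : Int × Int :=
  text.toList.foldl
    (fun (st : Int × Int) (char : Char) =>
      if char = '\n' then (st.1 + 1, 1) else (st.1, st.2 + 1))
    (line, col)

-- ===== PORT B =====
-- text.count('\n') for a single character is the character count; text[::-1].find('\n') is
-- the index of '\n' in the reversed characters, which (only reached when n ≠ 0, so '\n' is
-- present) is List.idxOf on the reversed list — exact on the reached inputs.
def advance_loc_py_alt (line : Int) (col : Int) (text : String) : Int × Int :=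
  let cs := text.toList
  let n : Int := cs.count '\n'
  if n = 0 then (line, col + cs.length)
  else (line + n, 1 + (cs.reverse.idxOf '\n' : Int))

-- ===== PRECONDITION & SPEC =====
def Spec_advance_loc_py (line : Int) (col : Int) (text : String) (out : Int × Int) : Prop := out = advance_loc_py_alt line col text
instance (line : Int) (col : Int) (text : String) (out : Int × Int) : Decidable (Spec_advance_loc_py line col text out) := by unfold Spec_advance_loc_py; infer_instance

-- ===== CLAIM (what is proved, stated in full; the proofs are below) =====
def Claim_equal_advance_loc_py : Prop := ∀ (line : Int) (col : Int) (text : String), Dom_advance_loc_py line col text → Spec_advance_loc_py line col text (advance_loc_py line col text)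

-- ===== LEMMAS AND PROOFS =====

-- ===== VERDICT (by name: the statement is the Claim_ definition above) =====
lemma advance_loc_loop (cs : List Char) (line col : Int) :
    cs.foldl
      (fun (st : Int × Int) (char : Char) =>
        if char = '\n' then (st.1 + 1, 1) else (st.1, st.2 + 1))
      (line, col)
    = if (cs.count '\n' : Int) = 0 then (line, col + cs.length)
      else (line + cs.count '\n', 1 + (cs.reverse.idxOf '\n' : Int)) := by
  induction cs generalizing line col with
  | nil => simp
  | cons c rest ih =>
    by_cases hc : c = '\n'
    · subst hc
      simp only [List.foldl_cons]
      rw [ih]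
      by_cases h0 : rest.count '\n' = 0
      · have hmemr : '\n' ∉ rest.reverse := by simp [List.count_eq_zero.mp h0]
        simp [h0, List.idxOf_append, hmemr]
      · have hmem : '\n' ∈ rest := List.count_pos_iff.mp (Nat.pos_of_ne_zero h0)
        have hmemr : '\n' ∈ rest.reverse := by simpa using hmem
        have h1 : ((rest.count '\n' : Int) + 1) ≠ 0 := by positivity
        simp [h0, List.idxOf_append, hmemr, h1, Prod.ext_iff]
        omega
    · simp only [List.foldl_cons, if_neg hc]
      rw [ih]
      by_cases h0 : rest.count '\n' = 0
      · simp [h0, hc]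
        omega
      · have hmem : '\n' ∈ rest := List.count_pos_iff.mp (Nat.pos_of_ne_zero h0)
        have hmemr : '\n' ∈ rest.reverse := by simpa using hmem
        simp [hc, h0, List.idxOf_append, hmemr]

theorem advance_loc_py_spec : Claim_equal_advance_loc_py := by
  intro line col text _
  unfold Spec_advance_loc_py advance_loc_py advance_loc_py_alt
  simpa using advance_loc_loop text.toList line col
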